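-- pv_equiv track=rewrite | github.com/JhonJaderLopez/AddressFormat | main.py | borrar_repetido
-- ===== SOURCE A (Python) =====
-- def borrar_repetido(direcciones):
--     direccion_limpia = []
--     for direccion in direcciones:
--         # Dividimos la cadena en palabras
--         palabras = direccion.split()
--
--         # Contadores para las coincidencias
--         coincidencias = 0
--
--         # Lista para almacenar las palabras válidas
--         palabras_validas = []
--
--         for palabra in palabras:
--             if palabra in ["CL", "CR", "TV"]:
--                 coincidencias += 1
--                 if coincidencias == 2:
--                     break  # Detenemos el proceso si encontramos la segunda coincidencia
--             palabras_validas.append(palabra)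
--             # Ahora puedes unir las palabras válidas en una cadena nuevamente
--         resultado = ' '.join(palabras_validas)
--         direccion_limpia.append(resultado)
--     return direccion_limpia
-- ===== SOURCE B (Python) =====
-- def borrar_repetido(direcciones):
--     direccion_limpia = []
--     for direccion in direcciones:
--         palabras = direccion.split()
--         idx = [i for i, p in enumerate(palabras) if p in ("CL", "CR", "TV")]
--         if len(idx) >= 2:
--             palabras = palabras[:idx[1]]
--         direccion_limpia.append(' '.join(palabras))
--     return direccion_limpia
-- ===== Notes on version B (the rewrite author's own statement) =====
-- stated objective: simpler
-- what changed: B first collects the indices of all CL/CR/TV keywords with enumerate and then slices the word list before the second such index, instead of A's accumulator loop with a running match counter and a break.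
import Mathlib
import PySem

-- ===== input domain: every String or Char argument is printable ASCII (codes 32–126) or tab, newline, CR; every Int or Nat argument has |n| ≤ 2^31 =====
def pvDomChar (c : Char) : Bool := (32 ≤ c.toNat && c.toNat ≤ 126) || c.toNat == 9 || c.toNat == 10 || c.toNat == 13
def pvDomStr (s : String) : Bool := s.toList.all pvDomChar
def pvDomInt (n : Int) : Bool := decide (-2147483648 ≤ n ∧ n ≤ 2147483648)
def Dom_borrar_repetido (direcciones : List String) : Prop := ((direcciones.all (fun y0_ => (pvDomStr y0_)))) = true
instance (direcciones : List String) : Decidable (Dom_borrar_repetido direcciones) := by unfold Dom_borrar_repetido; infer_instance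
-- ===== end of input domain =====

-- B collects the keyword indices with enumerate and slices before the second one,
-- instead of A's accumulator loop with a running counter and break; objective: simpler.


-- 'palabra in ["CL", "CR", "TV"]' / 'p in ("CL", "CR", "TV")' (both sources test the same membership)
def pvEsClave (w : String) : Bool := w == "CL" || w == "CR" || w == "TV"

-- ===== PORT A =====
-- inner loop of A: state = (coincidencias, palabras_validas); break at the second keyword
def pvLoopA (palabras : List String) (coincidencias : Int) (palabras_validas : List String) :
    List String :=
  match palabras with
  | [] => palabras_validas
  | palabra :: rest =>
    if pvEsClave palabra then
      if coincidencias + 1 = 2 then palabras_validas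
      else pvLoopA rest (coincidencias + 1) (palabras_validas ++ [palabra])
    else pvLoopA rest coincidencias (palabras_validas ++ [palabra])

def borrar_repetido (direcciones : List String) : List String :=
  direcciones.map (fun direccion =>
    PySem.Str.join " " (pvLoopA (PySem.Str.split₀ direccion) 0 []))

-- ===== PORT B =====
-- one address of B: keyword indices via enumerate, then slice before the second
def pvAltOne (palabras : List String) : List String :=
  let idx := ((PySem.List.enumerate palabras 0).filter (fun p => pvEsClave p.2)).map (·.1)
  match idx[1]? with
  | some j => PySem.List.slice palabras none (some j)
  | none => palabras

def borrar_repetido_alt (direcciones : List String) : List String :=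
  direcciones.map (fun direccion =>
    PySem.Str.join " " (pvAltOne (PySem.Str.split₀ direccion)))

-- ===== PRECONDITION & SPEC =====
def Spec_borrar_repetido (direcciones : List String) (out : List String) : Prop := out = borrar_repetido_alt direcciones
instance (direcciones : List String) (out : List String) : Decidable (Spec_borrar_repetido direcciones out) := by unfold Spec_borrar_repetido; infer_instance

-- ===== CLAIM (what is proved, stated in full; the proofs are below) =====
def Claim_equal_borrar_repetido : Prop := ∀ (direcciones : List String), Dom_borrar_repetido direcciones → Spec_borrar_repetido direcciones (borrar_repetido direcciones)

-- ===== LEMMAS AND PROOFS =====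

-- B's keyword-index list, with a general enumerate start
def pvIdx (ws : List String) (s : Int) : List Int :=
  ((PySem.List.enumerate ws s).filter (fun p => pvEsClave p.2)).map (·.1)

theorem pvAltOne_eq (ws : List String) :
    pvAltOne ws
      = ((pvIdx ws 0)[1]?.map (fun j => PySem.List.slice ws none (some j))).getD ws := by
  show (match (pvIdx ws 0)[1]? with
        | some j => PySem.List.slice ws none (some j)
        | none => ws) = _
  cases (pvIdx ws 0)[1]? <;> rfl

theorem pvIdx_cons (w : String) (ws : List String) (s : Int) :
    pvIdx (w :: ws) s = if pvEsClave w then s :: pvIdx ws (s + 1) else pvIdx ws (s + 1) := by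
  simp [pvIdx, PySem.List.enumerate_cons]
  split_ifs with h <;> simp [h]

theorem pvIdx_shift (ws : List String) (s t : Int) :
    pvIdx ws s = (pvIdx ws t).map (fun j => j + (s - t)) := by
  induction ws generalizing s t with
  | nil => simp [pvIdx]
  | cons w ws ih =>
    rw [pvIdx_cons, pvIdx_cons]
    split_ifs with h
    · rw [ih (s + 1) (t + 1), List.map_cons]
      exact List.cons_eq_cons.mpr
        ⟨by ring, List.map_congr_left (fun j _ => by ring)⟩
    · rw [ih (s + 1) (t + 1)]
      exact List.map_congr_left (fun j _ => by ring)

-- the head of pvIdx locates the first keyword: takeWhile prefix characterisation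
theorem pvIdx_head (ws : List String) (s : Int) :
    ((pvIdx ws s)[0]? = none ∧ ws.takeWhile (fun w => !pvEsClave w) = ws) ∨
    (∃ k : Nat, (pvIdx ws s)[0]? = some (s + k) ∧
      ws.takeWhile (fun w => !pvEsClave w) = ws.take k) := by
  induction ws generalizing s with
  | nil => left; exact ⟨by simp [pvIdx], rfl⟩
  | cons w ws ih =>
    rw [pvIdx_cons]
    by_cases h : pvEsClave w
    · right; exact ⟨0, by simp [h], by simp [h]⟩
    · rcases ih (s + 1) with ⟨h1, h2⟩ | ⟨k, h1, h2⟩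
      · left; simp [h, h1, h2]
      · right
        refine ⟨k + 1, ?_, ?_⟩
        · rw [if_neg h, h1]
          congr 1; push_cast; ring
        · simp [h, h2]

-- A's loop once one keyword has been seen: stop at the next keyword
theorem pvLoopA_one (ws : List String) (acc : List String) :
    pvLoopA ws 1 acc = acc ++ ws.takeWhile (fun w => !pvEsClave w) := by
  induction ws generalizing acc with
  | nil => simp [pvLoopA]
  | cons w ws ih =>
    by_cases h : pvEsClave w
    · simp [pvLoopA, h]
    · simp [pvLoopA, h, ih]

theorem pvIdx_nonneg (ws : List String) (s : Int) (j : Int) (hj : j ∈ pvIdx ws s) : s ≤ j := by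
  induction ws generalizing s with
  | nil => simp [pvIdx] at hj
  | cons w ws ih =>
    rw [pvIdx_cons] at hj
    by_cases h : pvEsClave w
    · simp [h] at hj
      rcases hj with rfl | hj
      · exact le_refl _
      · linarith [ih (s + 1) hj]
    · simp [h] at hj; linarith [ih (s + 1) hj]

-- main per-address lemma
theorem pvLoopA_zero (ws : List String) (acc : List String) :
    pvLoopA ws 0 acc = acc ++ pvAltOne ws := by
  induction ws generalizing acc with
  | nil =>
    have h0 : pvAltOne [] = [] := rfl
    simp [pvLoopA, h0]
  | cons w ws ih =>
    rw [pvAltOne_eq]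
    by_cases h : pvEsClave w
    · -- head is a keyword: A switches to counter 1; B's second index is rest's first
      have hA : pvLoopA (w :: ws) 0 acc = pvLoopA ws 1 (acc ++ [w]) := by
        simp [pvLoopA, h]
      have hI : pvIdx (w :: ws) 0 = 0 :: pvIdx ws 1 := by
        rw [pvIdx_cons]; simp [h]
      rw [hA, pvLoopA_one, hI,
        show ((0 : Int) :: pvIdx ws 1)[1]? = (pvIdx ws 1)[0]? from by simp]
      rcases pvIdx_head ws 1 with ⟨h1, h2⟩ | ⟨k, h1, h2⟩
      · rw [h1]; simp [h2]
      · rw [h1]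
        simp only [Option.map_some, Option.getD_some]
        have hs : PySem.List.slice (w :: ws) none (some ((1 : Int) + (k : Nat)))
            = (w :: ws).take (1 + k) := by
          rw [show ((1 : Int) + (k : Nat)) = ((1 + k : Nat) : Int) by push_cast; ring,
            PySem.List.slice_to_natCast]
        rw [hs, h2, show 1 + k = k + 1 from Nat.add_comm 1 k, List.take_succ_cons]
        simp
    · -- head not a keyword: both sides keep w and recurse
      have hA : pvLoopA (w :: ws) 0 acc = pvLoopA ws 0 (acc ++ [w]) := by
        simp [pvLoopA, h]
      have hI : pvIdx (w :: ws) 0 = (pvIdx ws 0).map (fun j => j + 1) := by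
        rw [pvIdx_cons, if_neg h, show (0 : Int) + 1 = 1 from rfl]
        simpa using pvIdx_shift ws 1 0
      rw [hA, ih, pvAltOne_eq, hI]
      cases hj : (pvIdx ws 0)[1]? with
      | none => simp [hj]
      | some j =>
        have hj0 : (0 : Int) ≤ j :=
          pvIdx_nonneg ws 0 j (List.mem_of_getElem? hj)
        have hmap : ((pvIdx ws 0).map (fun j => j + 1))[1]? = some (j + 1) := by
          simp [hj]
        rw [hmap]
        simp only [Option.map_some, Option.getD_some]
        rw [PySem.List.slice_to ws hj0,
          PySem.List.slice_to (w :: ws) (by linarith : (0:Int) ≤ j + 1),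
          show (j + 1).toNat = j.toNat + 1 by omega, List.take_succ_cons]
        simp

-- ===== VERDICT (by name: the statement is the Claim_ definition above) =====
theorem borrar_repetido_spec : Claim_equal_borrar_repetido := by
  intro direcciones _
  show borrar_repetido direcciones = borrar_repetido_alt direcciones
  unfold borrar_repetido borrar_repetido_alt
  refine List.map_congr_left (fun d _ => ?_)
  rw [pvLoopA_zero]
  simp
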